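-- pv_equiv track=rewrite | github.com/sqrtxander/aoc2023 | day14/part1.py | solve
-- ===== SOURCE A (Python) =====
-- def solve(s: str) -> int:
--     rocks = s.splitlines()
--     slidden_rocks = []
--     for col in zip(*rocks):
--         col_s = ''.join(col)
--         prev = ''
--         while prev != col_s:
--             prev = col_s
--             col_s = col_s.replace('.O', 'O.')
--         slidden_rocks.append(col_s)
--
--     slidden_rocks = list(zip(*slidden_rocks))
--
--     total = 0
--     i = len(slidden_rocks)
--     for row in slidden_rocks:
--         total += i * row.count('O')
--         i -= 1
--     return total
-- ===== SOURCE B (Python) =====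
-- def solve(s: str) -> int:
--     rows = s.splitlines()
--     if not rows:
--         return 0
--     n = len(rows)
--     width = min(len(r) for r in rows)
--     total = 0
--     for c in range(width):
--         free = 0
--         for r in range(n):
--             ch = rows[r][c]
--             if ch == 'O':
--                 total += n - free
--                 free += 1
--             elif ch != '.':
--                 free = r + 1
--     return total
-- ===== Notes on version B (the rewrite author's own statement) =====
-- stated objective: alternative
-- what changed: Replaces the transpose + repeated string.replace('.O','O.') fixpoint + second transpose with a single indexed pass per column that tracks the next free landing row and accumulates the weighted load directly, never building the slid grid.
import Mathlib
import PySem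

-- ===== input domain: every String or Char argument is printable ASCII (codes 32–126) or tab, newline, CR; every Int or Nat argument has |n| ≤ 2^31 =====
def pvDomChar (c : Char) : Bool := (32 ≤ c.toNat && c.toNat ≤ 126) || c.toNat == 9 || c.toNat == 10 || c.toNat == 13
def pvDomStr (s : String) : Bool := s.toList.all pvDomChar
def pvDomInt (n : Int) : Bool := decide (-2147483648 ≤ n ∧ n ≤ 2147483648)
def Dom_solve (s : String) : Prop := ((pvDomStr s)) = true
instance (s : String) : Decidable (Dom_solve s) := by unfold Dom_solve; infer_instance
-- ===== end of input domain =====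

-- B replaces A's transpose + repeated replace('.O','O.') fixpoint + second transpose with a
-- single indexed pass per column that tracks the next free landing row and sums the load directly.

-- ===== PORT A =====
-- A's column strings are ported at the code-point level (List Char) via PySem.Chars (exact).
-- pvPass is what one str.replace('.O','O.') computes (proved: pvReplace_eq); pvWsum is the
-- termination measure for A's while loop, cited by pvSlide's decreasing_by.

def pvPass : List Char → List Char
  | [] => []
  | [c] => [c]
  | c₁ :: c₂ :: t =>
    if c₁ = '.' ∧ c₂ = 'O' then 'O' :: '.' :: pvPass t else c₁ :: pvPass (c₂ :: t)
termination_by l => l.length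

def pvWsum : List Char → Nat
  | [] => 0
  | _ :: t => t.count 'O' + pvWsum t

theorem pvReplaceGo_eq (fuel : Nat) : ∀ (l acc : List Char), l.length ≤ fuel →
    PySem.Chars.replace.go ['.', 'O'] ['O', '.'] fuel l acc = acc.reverse ++ pvPass l := by
  induction fuel with
  | zero =>
    intro l acc h
    have hl : l = [] := by cases l <;> simp_all
    subst hl
    rw [PySem.Chars.replace.go.eq_def]
    simp [pvPass]
  | succ m ih =>
    intro l acc h
    match l with
    | [] => rw [PySem.Chars.replace.go.eq_def]; simp [pvPass]
    | [c] =>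
      rw [PySem.Chars.replace.go.eq_def]
      have hp : List.isPrefixOf ['.', 'O'] [c] = false := by
        simp [List.isPrefixOf]
      simp only [hp, Bool.false_eq_true, ite_false]
      rw [ih [] (c :: acc) (by simp)]
      simp [pvPass]
    | c1 :: c2 :: t =>
      rw [PySem.Chars.replace.go.eq_def]
      by_cases hc : c1 = '.' ∧ c2 = 'O'
      · obtain ⟨h1, h2⟩ := hc
        subst h1; subst h2
        have hp : List.isPrefixOf ['.', 'O'] ('.' :: 'O' :: t) = true := by
          simp [List.isPrefixOf]
        simp only [hp, if_pos]
        show PySem.Chars.replace.go ['.', 'O'] ['O', '.'] m t (['O','.'].reverse ++ acc) = _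
        rw [ih t _ (by simp at h ⊢; omega)]
        simp [pvPass]
      · have hp : List.isPrefixOf ['.', 'O'] (c1 :: c2 :: t) = false := by
          simp [List.isPrefixOf]
          intro h1 h2; exact hc ⟨h1.symm, h2.symm⟩
        simp only [hp, Bool.false_eq_true, ite_false]
        rw [ih (c2 :: t) _ (by simp at h ⊢; omega)]
        rw [pvPass]
        simp [hc]

theorem pvReplace_eq (l : List Char) :
    PySem.Chars.replace l ['.', 'O'] ['O', '.'] = pvPass l := by
  rw [PySem.Chars.replace]
  simp only [List.isEmpty_iff, reduceCtorEq, ite_false]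
  exact pvReplaceGo_eq l.length l [] le_rfl

theorem pvCount_pass (l : List Char) : (pvPass l).count 'O' = l.count 'O' := by
  induction l using pvPass.induct with
  | case1 => simp [pvPass]
  | case2 c => simp [pvPass]
  | case3 c1 c2 t hc ih =>
    rw [pvPass]; obtain ⟨h1, h2⟩ := hc; subst h1; subst h2
    simp [List.count_cons, ih]
  | case4 c1 c2 t hc ih =>
    rw [pvPass, if_neg hc]
    simp [List.count_cons, ih]

theorem pvWsum_le (l : List Char) : pvWsum (pvPass l) ≤ pvWsum l := by
  induction l using pvPass.induct with
  | case1 => simp [pvPass]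
  | case2 c => simp [pvPass]
  | case3 c1 c2 t hc ih =>
    rw [pvPass]; obtain ⟨h1, h2⟩ := hc; subst h1; subst h2
    simp [pvWsum, List.count_cons, pvCount_pass]
    omega
  | case4 c1 c2 t hc ih =>
    rw [pvPass, if_neg hc]
    simp [pvWsum, pvCount_pass] at ih ⊢
    omega

theorem pvWsum_lt (l : List Char) (h : pvPass l ≠ l) : pvWsum (pvPass l) < pvWsum l := by
  induction l using pvPass.induct with
  | case1 => simp [pvPass] at h
  | case2 c => simp [pvPass] at h
  | case3 c1 c2 t hc ih =>
    rw [pvPass] at *; obtain ⟨h1, h2⟩ := hc; subst h1; subst h2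
    have := pvWsum_le t
    simp [pvWsum, List.count_cons, pvCount_pass]
    omega
  | case4 c1 c2 t hc ih =>
    rw [pvPass, if_neg hc] at h ⊢
    have h2 : pvPass (c2 :: t) ≠ c2 :: t := by
      intro he; exact h (by rw [he])
    have := ih h2
    simp [pvWsum, pvCount_pass] at this ⊢
    omega

def pvSlide (prev cur : List Char) : List Char :=
  if prev = cur then cur
  else pvSlide cur (PySem.Chars.replace cur ['.', 'O'] ['O', '.'])
termination_by 2 * pvWsum cur + (if prev = cur then 0 else 1)
decreasing_by
  rename_i hne
  rw [pvReplace_eq]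
  by_cases h : pvPass cur = cur
  · simp [h, hne]
  · have h1 := pvWsum_lt cur h
    have : (if cur = pvPass cur then 0 else 1) ≤ 1 := by split <;> omega
    omega

def pvZipN (ls : List (List Char)) : List (List Char) :=
  match ls with
  | [] => []
  | _ :: _ =>
    (List.range (((ls.map List.length).min?).getD 0)).map
      (fun j => ls.map (fun r => r.getD j ' '))

def solve (s : String) : Int :=
  let rocks := PySem.Str.splitlines s
  let slidden := (pvZipN (rocks.map String.toList)).map
      (fun col => pvSlide [] (PySem.Chars.join [] (col.map (fun c => [c]))))
  let rows2 := pvZipN slidden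
  (rows2.foldl
    (fun (st : Int × Int) row => (st.1 + st.2 * (PySem.List.count row 'O' : Int), st.2 - 1))
    (0, (rows2.length : Int))).1

-- ===== PORT B =====

-- range(width)/range(n) are List.range (the bounds are non-negative); rows[r][c] has
-- 0 ≤ r < len(rows) and 0 ≤ c < width ≤ len(rows[r]), so getD is exact there.
def solve_alt (s : String) : Int :=
  let rows := PySem.Str.splitlines s
  if rows = [] then 0
  else
    let n := rows.length
    let width := ((rows.map PySem.Str.len).min?).getD 0
    (List.range width.toNat).foldl
      (fun total c =>
        ((List.range n).foldl
          (fun (st : Nat × Int) r =>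
            let ch := (rows.getD r "").toList.getD c ' '
            if ch = 'O' then (st.1 + 1, st.2 + ((n : Int) - (st.1 : Int)))
            else if ch = '.' then st
            else (r + 1, st.2))
          (0, total)).2)
      0

-- ===== PRECONDITION & SPEC =====
def Spec_solve (s : String) (out : Int) : Prop := out = solve_alt s
instance (s : String) (out : Int) : Decidable (Spec_solve s out) := by unfold Spec_solve; infer_instance

-- ===== CLAIM (what is proved, stated in full; the proofs are below) =====
def Claim_equal_solve : Prop := ∀ (s : String), Dom_solve s → Spec_solve s (solve s)

-- ===== LEMMAS AND PROOFS =====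

def pvF (n : Int) : List Char → Nat → Nat → Int
  | [], _, _ => 0
  | c :: t, free, r =>
    if c = 'O' then (n - free) + pvF n t (free + 1) (r + 1)
    else if c = '.' then pvF n t free (r + 1)
    else pvF n t (r + 1) (r + 1)

def pvG (n : Int) : List Char → Nat → Int
  | [], _ => 0
  | c :: t, r => (if c = 'O' then n - r else 0) + pvG n t (r + 1)

theorem pvF_pass (n : Int) (l : List Char) : ∀ free r,
    pvF n (pvPass l) free r = pvF n l free r := by
  induction l using pvPass.induct with
  | case1 => intro free r; rw [pvPass]
  | case2 c => intro free r; rw [pvPass]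
  | case3 c1 c2 t hc ih =>
    intro free r
    obtain ⟨h1, h2⟩ := hc; subst h1; subst h2
    rw [pvPass]
    simp [pvF, ih]
  | case4 c1 c2 t hc ih =>
    intro free r
    rw [pvPass, if_neg hc]
    by_cases h1 : c1 = 'O' <;> by_cases h2 : c1 = '.' <;>
      simp [pvF, h1, h2, ih]

theorem pvLength_pass (l : List Char) : (pvPass l).length = l.length := by
  induction l using pvPass.induct with
  | case1 => simp [pvPass]
  | case2 c => simp [pvPass]
  | case3 c1 c2 t hc ih =>
    rw [pvPass]; obtain ⟨h1, h2⟩ := hc; subst h1; subst h2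
    simp [ih]
  | case4 c1 c2 t hc ih =>
    rw [pvPass, if_neg hc]; simp [ih]

theorem pvSlide_fix : ∀ (prev cur : List Char), (prev = cur → pvPass cur = cur) →
    pvPass (pvSlide prev cur) = pvSlide prev cur := by
  intro prev cur
  induction prev, cur using pvSlide.induct with
  | case1 c => intro h; rw [pvSlide, if_pos rfl]; exact h rfl
  | case2 p c hne ih =>
    intro h
    rw [pvSlide, if_neg hne]
    apply ih
    intro he
    rw [pvReplace_eq] at he ⊢
    rw [← he]
    exact he.symm

theorem pvSlide_F (n : Int) (prev cur : List Char) (free r : Nat) :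
    pvF n (pvSlide prev cur) free r = pvF n cur free r := by
  induction prev, cur using pvSlide.induct generalizing free r with
  | case1 c => rw [pvSlide, if_pos rfl]
  | case2 p c hne ih =>
    rw [pvSlide, if_neg hne]
    rw [ih]
    rw [pvReplace_eq, pvF_pass]

theorem pvSlide_len (prev cur : List Char) : (pvSlide prev cur).length = cur.length := by
  induction prev, cur using pvSlide.induct with
  | case1 c => rw [pvSlide, if_pos rfl]
  | case2 p c hne ih =>
    rw [pvSlide, if_neg hne, ih, pvReplace_eq, pvLength_pass]

theorem pvF_cons (n : Int) (c : Char) (t : List Char) (free r : Nat) :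
    pvF n (c :: t) free r =
      (if c = 'O' then (n - free) + pvF n t (free + 1) (r + 1)
       else if c = '.' then pvF n t free (r + 1)
       else pvF n t (r + 1) (r + 1)) := rfl

theorem pvG_cons (n : Int) (c : Char) (t : List Char) (r : Nat) :
    pvG n (c :: t) r = (if c = 'O' then n - r else 0) + pvG n t (r + 1) := rfl

theorem pvF_fix (n : Int) (l : List Char) : ∀ free r, pvPass l = l →
    (free = r ∨ l.head? ≠ some 'O') → pvF n l free r = pvG n l r := by
  induction l using pvPass.induct with
  | case1 => intro free r _ _; rw [pvF, pvG]
  | case2 c =>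
    intro free r _ hd
    by_cases h1 : c = 'O'
    · subst h1
      have hfr : free = r := by
        rcases hd with h | h
        · exact h
        · simp at h
      subst hfr
      simp [pvF, pvG]
    · by_cases h2 : c = '.' <;> simp [pvF, pvG, h1, h2]
  | case3 c1 c2 t hc ih =>
    intro free r hp _
    obtain ⟨h1, h2⟩ := hc; subst h1; subst h2
    rw [pvPass] at hp
    simp at hp
  | case4 c1 c2 t hc ih =>
    intro free r hp hd
    rw [pvPass, if_neg hc] at hp
    have hp2 : pvPass (c2 :: t) = c2 :: t := by simpa using hp
    by_cases h1 : c1 = 'O'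
    · subst h1
      have hfr : free = r := by
        rcases hd with h | h
        · exact h
        · simp at h
      subst hfr
      rw [pvF_cons, pvG_cons]
      simp only [reduceIte]
      rw [ih (free + 1) (free + 1) hp2 (Or.inl rfl)]
    · by_cases h2 : c1 = '.'
      · subst h2
        have hc2 : c2 ≠ 'O' := fun he => hc ⟨rfl, he⟩
        rw [pvF_cons, pvG_cons]
        simp only [reduceIte]
        rw [ih free (r + 1) hp2 (Or.inr (by simp [hc2]))]
        simp
      · rw [pvF_cons, pvG_cons, if_neg h1, if_neg h2, if_neg h1]
        rw [ih (r + 1) (r + 1) hp2 (Or.inl rfl)]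
        simp

def pvGA : List (List Char) → Int → Int
  | [], _ => 0
  | row :: rest, i => i * (PySem.List.count row 'O' : Int) + pvGA rest (i - 1)

theorem pvFoldA_eq (l : List (List Char)) : ∀ (t0 i0 : Int),
    (l.foldl
      (fun (st : Int × Int) row => (st.1 + st.2 * (PySem.List.count row 'O' : Int), st.2 - 1))
      (t0, i0)).1 = t0 + pvGA l i0 := by
  induction l with
  | nil => intro t0 i0; simp [pvGA]
  | cons row rest ih =>
    intro t0 i0
    simp only [List.foldl_cons, pvGA, ih]
    ring

theorem pvGA_range (m : Nat) : ∀ (h : Nat → List Char) (i0 : Int),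
    pvGA ((List.range m).map h) i0
      = ∑ j ∈ Finset.range m, (i0 - j) * (PySem.List.count (h j) 'O' : Int) := by
  induction m with
  | zero => intro h i0; simp [pvGA]
  | succ m ih =>
    intro h i0
    rw [List.range_succ_eq_map]
    simp only [List.map_cons, List.map_map, pvGA]
    rw [ih (h ∘ Nat.succ) (i0 - 1), Finset.sum_range_succ']
    simp only [Function.comp_apply, Nat.cast_zero, Nat.cast_add, Nat.cast_one, sub_zero]
    rw [add_comm]
    congr 1
    apply Finset.sum_congr rfl
    intro j _
    have : Nat.succ j = j + 1 := rfl
    rw [this]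
    push_cast
    ring

theorem pvG_eq_sum (n : Int) (col : List Char) : ∀ (r : Nat),
    pvG n col r
      = ∑ j ∈ Finset.range col.length,
          (if col.getD j ' ' = 'O' then n - ((r : Int) + j) else 0) := by
  induction col with
  | nil => intro r; simp [pvG]
  | cons c t ih =>
    intro r
    rw [pvG_cons, List.length_cons, Finset.sum_range_succ', ih (r + 1)]
    simp only [List.getD_cons_succ, List.getD_cons_zero, Nat.cast_zero, add_zero]
    rw [add_comm]
    congr 1
    apply Finset.sum_congr rfl
    intro j _
    split_ifs with hh
    · push_cast; ring
    · rfl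

theorem pvColsSum (m : Nat) : ∀ (cols : List (List Char)),
    ∑ j ∈ Finset.range m,
        ((m : Int) - j) * (PySem.List.count (cols.map (fun col => col.getD j ' ')) 'O' : Int)
      = (cols.map
          (fun col => ∑ j ∈ Finset.range m,
            (if col.getD j ' ' = 'O' then (m : Int) - j else 0))).sum := by
  intro cols
  induction cols with
  | nil => simp [PySem.List.count_eq]
  | cons c rest ih =>
    simp only [List.map_cons, List.sum_cons, PySem.List.count_eq, List.count_cons,
      List.getD_eq_getElem?_getD, beq_iff_eq] at ih ⊢
    rw [← ih]
    rw [← Finset.sum_add_distrib]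
    apply Finset.sum_congr rfl
    intro j _
    push_cast
    split_ifs with h <;> ring

theorem pvInner (n : Int) (R : Nat → Char) : ∀ (l : List Char) (r0 free : Nat) (t : Int),
    (∀ i, i < l.length → R (r0 + i) = l.getD i ' ') →
    ((List.range' r0 l.length).foldl
      (fun (st : Nat × Int) r =>
        if R r = 'O' then (st.1 + 1, st.2 + (n - st.1))
        else if R r = '.' then st else (r + 1, st.2)) (free, t)).2
      = t + pvF n l free r0 := by
  intro l
  induction l with
  | nil => intro r0 free t _; simp [pvF]
  | cons c0 t0 ih =>
    intro r0 free t hc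
    have h0 : R r0 = c0 := by simpa using hc 0 (by simp)
    have hs : ∀ i, i < t0.length → R (r0 + 1 + i) = t0.getD i ' ' := by
      intro i hi
      have := hc (i + 1) (by simp; omega)
      simpa [Nat.add_comm, Nat.add_assoc, Nat.add_left_comm] using this
    rw [List.length_cons, List.range'_succ, List.foldl_cons, pvF_cons, h0]
    by_cases h1 : c0 = 'O'
    · simp only [h1, reduceIte]
      rw [ih (r0 + 1) (free + 1) (t + (n - free)) hs]
      ring
    · by_cases h2 : c0 = '.'
      · rw [if_neg h1, if_neg h1, if_pos h2, if_pos h2]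
        exact ih (r0 + 1) free t hs
      · rw [if_neg h1, if_neg h1, if_neg h2, if_neg h2]
        exact ih (r0 + 1) (r0 + 1) t hs

theorem pvOuter (v : Nat → Int) (f : Int → Nat → Int) (hf : ∀ t c, f t c = t + v c) :
    ∀ (L : List Nat) (t0 : Int), L.foldl f t0 = t0 + (L.map v).sum := by
  intro L
  induction L with
  | nil => intro t0; simp
  | cons c rest ih =>
    intro t0
    rw [List.foldl_cons, hf, ih]
    simp [add_assoc]

theorem pvMinCast : ∀ (l : List Nat),
    (l.map (Nat.cast : Nat → Int)).min? = l.min?.map (Nat.cast : Nat → Int) := by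
  intro l
  induction l with
  | nil => simp
  | cons a t ih =>
    rw [List.map_cons, List.min?_cons, List.min?_cons, ih]
    cases h : t.min? with
    | none => simp
    | some b =>
      simp [h, Option.map_some]

theorem pvMinConst (n : Nat) : ∀ (l : List Nat), l ≠ [] → (∀ x ∈ l, x = n) →
    l.min? = some n := by
  intro l
  induction l with
  | nil => intro h _; exact absurd rfl h
  | cons a t ih =>
    intro _ hall
    rw [List.min?_cons]
    cases h : t.min? with
    | none => simp [hall a (by simp)]
    | some b =>
      have hb : b = n := by
        have := List.min?_mem h
        exact hall b (by simp [this])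
      simp [h, hb, hall a (by simp)]

theorem pvZipN_ne (ls : List (List Char)) (h : ls ≠ []) :
    pvZipN ls = (List.range (((ls.map List.length).min?).getD 0)).map
      (fun j => ls.map (fun r => r.getD j ' ')) := by
  cases ls with
  | nil => exact absurd rfl h
  | cons a t => rfl

theorem pvWidth (rows : List String) :
    ((((rows.map PySem.Str.len).min?).getD 0)).toNat
      = ((((rows.map String.toList).map List.length).min?).getD 0) := by
  have h1 : rows.map PySem.Str.len
      = ((rows.map String.toList).map List.length).map (Nat.cast : Nat → Int) := by
    simp only [List.map_map]
    apply List.map_congr_left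
    intro r _
    simp [PySem.Str.len, PySem.Chars.len]
  rw [h1, pvMinCast]
  cases h : ((rows.map String.toList).map List.length).min? <;> simp [h]

theorem pvRead (rows : List String) (c i : Nat) (hi : i < rows.length) :
    (rows.getD i "").toList.getD c ' '
      = ((rows.map String.toList).map (fun r => r.getD c ' ')).getD i ' ' := by
  simp [List.getD_eq_getElem?_getD, List.getElem?_map, List.getElem?_eq_getElem hi]

theorem pvMain (rows : List String) :
    ((pvZipN ((pvZipN (rows.map String.toList)).map
        (fun col => pvSlide [] (PySem.Chars.join [] (col.map (fun c => [c])))))).foldl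
      (fun (st : Int × Int) row => (st.1 + st.2 * (PySem.List.count row 'O' : Int), st.2 - 1))
      (0, ((pvZipN ((pvZipN (rows.map String.toList)).map
        (fun col => pvSlide [] (PySem.Chars.join [] (col.map (fun c => [c])))))).length : Int))).1
    = (if rows = [] then 0
       else
        (List.range ((((rows.map PySem.Str.len).min?).getD 0)).toNat).foldl
          (fun total c =>
            ((List.range rows.length).foldl
              (fun (st : Nat × Int) r =>
                let ch := (rows.getD r "").toList.getD c ' '
                if ch = 'O' then (st.1 + 1, st.2 + ((rows.length : Int) - (st.1 : Int)))
                else if ch = '.' then st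
                else (r + 1, st.2))
              (0, total)).2)
          0) := by
  by_cases h0 : rows = []
  · subst h0
    simp [pvZipN]
  · rw [if_neg h0, pvWidth]
    have hRLne : rows.map String.toList ≠ [] := by simpa
    set n := rows.length with hn
    set wN := ((((rows.map String.toList).map List.length).min?).getD 0) with hwN
    set colfn : Nat → List Char :=
      (fun j => (rows.map String.toList).map (fun r => r.getD j ' ')) with hcolfn
    have hcollen : ∀ j, (colfn j).length = n := by intro j; simp [hcolfn, hn]
    set g : Nat → List Char := (fun j => pvSlide [] (colfn j)) with hg
    set v : Nat → Int := (fun c => pvF (n : Int) (colfn c) 0 0) with hv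
    have hslid :
        ((pvZipN (rows.map String.toList)).map
          (fun col => pvSlide [] (PySem.Chars.join [] (col.map (fun c => [c])))))
          = (List.range wN).map g := by
      rw [pvZipN_ne _ hRLne, List.map_map]
      apply List.map_congr_left
      intro j _
      simp only [Function.comp_apply, PySem.Chars.join_nil_singletons, hg, hcolfn]
    rw [hslid]
    -- B side: outer loop is a sum of single-pass column loads
    have hB : ∀ (f : Int → Nat → Int), (∀ t c, f t c
          = ((List.range n).foldl
              (fun (st : Nat × Int) r =>
                let ch := (rows.getD r "").toList.getD c ' '
                if ch = 'O' then (st.1 + 1, st.2 + ((n : Int) - (st.1 : Int)))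
                else if ch = '.' then st
                else (r + 1, st.2))
              (0, t)).2) →
        (List.range wN).foldl f 0 = 0 + ((List.range wN).map v).sum := by
      intro f hf
      apply pvOuter
      intro t c
      rw [hf]
      have hread : ∀ i, i < (colfn c).length →
          (fun r => (rows.getD r "").toList.getD c ' ') (0 + i) = (colfn c).getD i ' ' := by
        intro i hi
        rw [hcollen c] at hi
        show (rows.getD (0 + i) "").toList.getD c ' ' = (colfn c).getD i ' '
        rw [Nat.zero_add, hcolfn]
        exact pvRead rows c i hi
      have hIn := pvInner (n : Int) (fun r => (rows.getD r "").toList.getD c ' ')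
        (colfn c) 0 0 t hread
      rw [List.range_eq_range', show List.range' 0 n = List.range' 0 (colfn c).length by
        rw [hcollen]]
      exact hIn
    rw [hB _ (fun t c => rfl), zero_add]
    by_cases hw0 : wN = 0
    · simp [hw0, pvZipN]
    -- A side
    have hgne : (List.range wN).map g ≠ [] := by
      simp [List.range_eq_nil, hw0]
    rw [pvZipN_ne _ hgne]
    have hslen : (((List.range wN).map g).map List.length).min? = some n := by
      apply pvMinConst
      · simpa [List.range_eq_nil] using hw0
      · intro x hx
        simp only [List.map_map, List.mem_map] at hx
        obtain ⟨j, _, rfl⟩ := hx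
        simp [hg, pvSlide_len, hcollen]
    rw [hslen]
    simp only [Option.getD_some]
    rw [pvFoldA_eq]
    simp only [List.length_map, List.length_range, zero_add]
    rw [pvGA_range]
    rw [pvColsSum n ((List.range wN).map g)]
    rw [List.map_map]
    apply congrArg List.sum
    apply List.map_congr_left
    intro c _
    simp only [Function.comp_apply]
    have hfix : pvPass (pvSlide [] (colfn c)) = pvSlide [] (colfn c) := by
      apply pvSlide_fix
      intro h
      rw [← h]
      simp [pvPass]
    have h1 : pvF (n : Int) (pvSlide [] (colfn c)) 0 0
        = pvG (n : Int) (pvSlide [] (colfn c)) 0 :=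
      pvF_fix _ _ 0 0 hfix (Or.inl rfl)
    have h2 : pvF (n : Int) (pvSlide [] (colfn c)) 0 0 = pvF (n : Int) (colfn c) 0 0 :=
      pvSlide_F _ _ _ 0 0
    simp only [hv, hg]
    rw [← h2, h1, pvG_eq_sum]
    have hlen2 : (pvSlide [] (colfn c)).length = n := by rw [pvSlide_len, hcollen]
    rw [hlen2]
    apply Finset.sum_congr rfl
    intro j _
    simp

-- ===== VERDICT (by name: the statement is the Claim_ definition above) =====
theorem solve_spec : Claim_equal_solve := by
  intro s _
  unfold Spec_solve solve solve_alt
  exact pvMain (PySem.Str.splitlines s)
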